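-- pv_equiv track=rewrite | github.com/aimanalishezan/Data-Finder | backend/import_finnish_data.py | get_company_name
-- ===== SOURCE A (Python) =====
-- def get_company_name(names_list):
--     """Extract the primary company name from names list"""
--     if not names_list or not isinstance(names_list, list):
--         return None
--
--     # Look for active names (no endDate or endDate is None)
--     active_names = [name for name in names_list if name.get('endDate') is None]
--
--     if active_names:
--         # Prefer type '1' (primary name)
--         primary_names = [name for name in active_names if name.get('type') == '1']
--         if primary_names:
--             return primary_names[0].get('name')
--         else:
--             return active_names[0].get('name')
--
--     # If no active names, get the most recent one
--     if names_list:
--         return names_list[0].get('name')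
--
--     return None
-- ===== SOURCE B (Python) =====
-- def get_company_name(names_list):
--     """Extract the primary company name from names list (single pass)."""
--     if not names_list or not isinstance(names_list, list):
--         return None
--     fp_found = fa_found = False
--     first_primary = first_active = None
--     for name in names_list:
--         if name.get('endDate') is None:
--             if not fa_found:
--                 fa_found = True
--                 first_active = name.get('name')
--             if not fp_found and name.get('type') == '1':
--                 fp_found = True
--                 first_primary = name.get('name')
--     if fp_found:
--         return first_primary
--     if fa_found:
--         return first_active
--     return names_list[0].get('name')
-- ===== Notes on version B (the rewrite author's own statement) =====
-- stated objective: alternative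
-- what changed: Replaces A's two list-comprehension filter passes plus indexing with a single loop that tracks the first primary-active and first active candidate with found flags.
import Mathlib
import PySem

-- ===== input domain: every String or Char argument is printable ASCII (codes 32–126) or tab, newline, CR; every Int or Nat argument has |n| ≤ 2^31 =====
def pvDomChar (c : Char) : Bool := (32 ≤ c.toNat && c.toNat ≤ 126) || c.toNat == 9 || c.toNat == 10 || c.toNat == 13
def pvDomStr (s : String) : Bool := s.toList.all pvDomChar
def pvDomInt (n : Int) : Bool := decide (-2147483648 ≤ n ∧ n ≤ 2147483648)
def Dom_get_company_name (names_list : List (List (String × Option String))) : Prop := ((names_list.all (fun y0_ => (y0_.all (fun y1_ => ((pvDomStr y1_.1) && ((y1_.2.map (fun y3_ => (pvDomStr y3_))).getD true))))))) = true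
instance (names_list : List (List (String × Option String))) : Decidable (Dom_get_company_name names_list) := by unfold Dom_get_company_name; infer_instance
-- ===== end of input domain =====

-- B replaces A's two filter passes + indexing with one loop keeping first-primary/first-active candidates (alternative decomposition).


-- shared helper: Python d.get(k) on an association-list dict with Option String values
-- (first matching key; missing key and a stored None both yield none, exactly as .get(k) is None)
def dget (d : List (String × Option String)) (k : String) : Option String :=
  match d.find? (fun p => p.1 == k) with
  | some p => p.2
  | none => none

-- ===== PORT A =====
def get_company_name (names_list : List (List (String × Option String))) : Option String :=
  if names_list.isEmpty then none
  else
    let active_names := names_list.filter (fun name => (dget name "endDate").isNone)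
    if !active_names.isEmpty then
      let primary_names := active_names.filter (fun name => dget name "type" == some "1")
      if !primary_names.isEmpty then
        dget (primary_names.headD []) "name"
      else
        dget (active_names.headD []) "name"
    else
      -- `if names_list:` is true here (guard above); names_list[0].get('name')
      dget (names_list.headD []) "name"

-- ===== PORT B =====
-- one loop step: state = (first_primary, first_active), each `some v` iff found with candidate v
def altStep (s : Option (Option String) × Option (Option String))
    (name : List (String × Option String)) : Option (Option String) × Option (Option String) :=
  if (dget name "endDate").isNone then
    let fa := if s.2.isNone then some (dget name "name") else s.2
    let fp := if s.1.isNone && (dget name "type" == some "1") then some (dget name "name") else s.1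
    (fp, fa)
  else s

def get_company_name_alt (names_list : List (List (String × Option String))) : Option String :=
  if names_list.isEmpty then none
  else
    let s := names_list.foldl altStep (none, none)
    match s.1 with
    | some v => v
    | none =>
      match s.2 with
      | some v => v
      | none => dget (names_list.headD []) "name"

-- ===== PRECONDITION & SPEC =====
def Spec_get_company_name (names_list : List (List (String × Option String))) (out : Option String) : Prop := out = get_company_name_alt names_list
instance (names_list : List (List (String × Option String))) (out : Option String) : Decidable (Spec_get_company_name names_list out) := by unfold Spec_get_company_name; infer_instance

-- ===== CLAIM (what is proved, stated in full; the proofs are below) =====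
def Claim_equal_get_company_name : Prop := ∀ (names_list : List (List (String × Option String))), Dom_get_company_name names_list → Spec_get_company_name names_list (get_company_name names_list)

-- ===== LEMMAS AND PROOFS =====

-- the fold state is the (first primary-active, first active) candidate, seeded by the accumulator
theorem altStep_fold_eq (l : List (List (String × Option String)))
    (fp fa : Option (Option String)) :
    l.foldl altStep (fp, fa) =
      (fp.or (((l.filter (fun d => dget d "type" == some "1" && (dget d "endDate").isNone)).head?).map (fun d => dget d "name")),
       fa.or (((l.filter (fun d => (dget d "endDate").isNone)).head?).map (fun d => dget d "name"))) := by
  induction l generalizing fp fa with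
  | nil => simp
  | cons d rest ih =>
    simp only [List.foldl_cons, altStep]
    by_cases hAct : (dget d "endDate").isNone
    · rw [ih]
      by_cases hPrim : dget d "type" == some "1" <;>
        cases fp <;> cases fa <;> simp [hAct, hPrim]
    · rw [ih]
      simp [hAct]

theorem get_company_name_spec : Claim_equal_get_company_name := by
  intro names_list _
  unfold Spec_get_company_name get_company_name get_company_name_alt
  cases hE : names_list.isEmpty with
  | true => simp
  | false =>
    simp only [Bool.false_eq_true, if_false]
    rw [altStep_fold_eq]
    simp only [Option.none_or]
    rw [List.filter_filter]
    cases hP : names_list.filter (fun d => dget d "type" == some "1" && (dget d "endDate").isNone) with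
    | cons p ps =>
      -- a primary active name exists: both return its name
      have hA : names_list.filter (fun name => (dget name "endDate").isNone) ≠ [] := by
        intro h
        have := List.filter_filter (p := fun d => dget d "type" == some "1")
          (q := fun name => (dget name "endDate").isNone) (l := names_list)
        rw [h, hP] at this
        exact List.cons_ne_nil _ _ this.symm
      simp [hA]
    | nil =>
      cases hA : names_list.filter (fun name => (dget name "endDate").isNone) with
      | nil => simp
      | cons a as => simp
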